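-- pv_equiv track=rewrite | github.com/JunfengWu163/graph_potential_similarity | graph_potential_similarity/matric2.py | get_ps
-- ===== SOURCE A (Python) =====
-- def get_ps(sum_rows):
--     sorted_rows = sorted(sum_rows)
--     ps = [0, 0, 0]
--     for x in sorted_rows:
--         x_sqr = x * x
--         x_cubic = x_sqr * x
--         ps[0] += x
--         ps[1] += x_sqr
--         ps[2] += x_cubic
--     return ps
-- ===== SOURCE B (Python) =====
-- def get_ps(sum_rows):
--     # Count multiplicities once, then sum each power weighted by its count:
--     # integer arithmetic is exact and commutative, so grouping equal values
--     # (and dropping the sort) cannot change the three sums.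
--     counts = {}
--     for x in sum_rows:
--         counts[x] = counts.get(x, 0) + 1
--     s1 = 0
--     s2 = 0
--     s3 = 0
--     for v, c in counts.items():
--         s1 += c * v
--         s2 += c * (v * v)
--         s3 += c * (v * v * v)
--     return [s1, s2, s3]
-- ===== Notes on version B (the rewrite author's own statement) =====
-- stated objective: alternative
-- what changed: Drop the sort entirely and compute the three power sums from a multiplicity counter (one dict-building pass, then one pass over distinct values weighted by count), relying on exactness and commutativity of integer addition.
import Mathlib
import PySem

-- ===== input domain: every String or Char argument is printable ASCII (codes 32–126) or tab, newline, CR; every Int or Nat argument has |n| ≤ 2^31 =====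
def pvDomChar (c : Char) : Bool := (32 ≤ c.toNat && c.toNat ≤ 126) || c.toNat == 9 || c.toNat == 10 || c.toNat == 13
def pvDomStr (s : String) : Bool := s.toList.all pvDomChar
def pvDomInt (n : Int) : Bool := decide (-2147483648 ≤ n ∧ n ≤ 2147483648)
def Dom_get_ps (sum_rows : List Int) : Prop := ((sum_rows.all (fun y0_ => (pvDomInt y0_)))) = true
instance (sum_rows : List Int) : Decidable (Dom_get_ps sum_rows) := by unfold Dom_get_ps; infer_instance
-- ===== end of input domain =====

-- B drops the sort and computes the three power sums from a multiplicity counter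
-- (one counting pass, then one weighted pass over distinct values); exact integer
-- addition is commutative, so the grouped sums equal A's fused sorted-loop sums.


-- ===== PORT A =====
-- sorted(sum_rows); then one fused loop updating ps = [s0, s1, s2] in place.
def get_ps (sum_rows : List Int) : List Int :=
  let sorted_rows := PySem.List.sorted sum_rows (fun x => x) false
  let ps := sorted_rows.foldl
    (fun (ps : Int × Int × Int) x =>
      let x_sqr := x * x
      let x_cubic := x_sqr * x
      (ps.1 + x, ps.2.1 + x_sqr, ps.2.2 + x_cubic))
    (0, 0, 0)
  [ps.1, ps.2.1, ps.2.2]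

-- ===== PORT B =====
-- counts = {}; for x: counts[x] = counts.get(x, 0) + 1; then one loop over counts.items().
def get_ps_alt (sum_rows : List Int) : List Int :=
  let counts := sum_rows.foldl
    (fun (d : PySem.Dict Int Int) x => d.insert x (d.getD x 0 + 1)) PySem.Dict.empty
  let s := counts.items.foldl
    (fun (s : Int × Int × Int) p =>
      (s.1 + p.2 * p.1, s.2.1 + p.2 * (p.1 * p.1), s.2.2 + p.2 * (p.1 * (p.1 * p.1))))
    (0, 0, 0)
  [s.1, s.2.1, s.2.2]

-- ===== PRECONDITION & SPEC =====
def Spec_get_ps (sum_rows : List Int) (out : List Int) : Prop := out = get_ps_alt sum_rows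
instance (sum_rows : List Int) (out : List Int) : Decidable (Spec_get_ps sum_rows out) := by
  unfold Spec_get_ps; infer_instance

-- ===== CLAIM =====
def Claim_equal_get_ps : Prop :=
  ∀ (sum_rows : List Int), Dom_get_ps sum_rows → Spec_get_ps sum_rows (get_ps sum_rows)

-- ===== LEMMAS AND PROOFS =====

-- A generic triple-accumulator fold is the triple of the three map-sums.
theorem triple_fold_eq {α : Type} (l : List α) (f g h : α → Int) (a b c : Int) :
    l.foldl (fun (s : Int × Int × Int) x => (s.1 + f x, s.2.1 + g x, s.2.2 + h x)) (a, b, c)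
      = (a + (l.map f).sum, b + (l.map g).sum, c + (l.map h).sum) := by
  induction l generalizing a b c with
  | nil => simp
  | cons x t ih => simp [List.foldl, ih]; refine ⟨by ring, by ring, by ring⟩

-- Summing f over the distinct values of l weighted by multiplicity is summing f over l.
theorem count_weight_sum (l : List Int) (f : Int → Int) :
    ((PySem.Set.ofList l).map (fun k => (l.count k : Int) * f k)).sum = (l.map f).sum := by
  have hnd : (PySem.Set.ofList l).Nodup := PySem.Set.nodup_ofList l
  have hfin : (PySem.Set.ofList l).toFinset = l.toFinset := by
    ext x; simp [List.mem_toFinset, PySem.Set.mem_ofList]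
  calc ((PySem.Set.ofList l).map (fun k => (l.count k : Int) * f k)).sum
      = (PySem.Set.ofList l).toFinset.sum (fun k => (l.count k : Int) * f k) :=
        (List.sum_toFinset _ hnd).symm
    _ = l.toFinset.sum (fun k => (l.count k : Int) * f k) := by rw [hfin]
    _ = (l.map f).sum := by
        rw [Finset.sum_list_map_count l f]
        simp

-- ===== VERDICT =====
theorem get_ps_spec : Claim_equal_get_ps := by
  intro l _
  unfold Spec_get_ps get_ps get_ps_alt
  dsimp only
  rw [PySem.Dict.foldl_insert_getD_add_one_eq_counter, PySem.Dict.items_counter,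
    List.foldl_map]
  dsimp only
  rw [triple_fold_eq, triple_fold_eq]
  have hs := PySem.List.sorted_perm l (fun x => x) false
  rw [count_weight_sum l (fun x => x), count_weight_sum l (fun x => x * x),
    count_weight_sum l (fun x => x * (x * x)),
    (hs.map (fun x => x)).sum_eq, (hs.map (fun x => x * x)).sum_eq,
    (hs.map fun x => x * x * x).sum_eq]
  simp [mul_assoc]
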